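-- pv_equiv track=rewrite | github.com/blaisethom/email-manager | src/email_manager/ingestion/gmail_client.py | _labels_to_folder
-- ===== SOURCE A (Python) =====
-- def _labels_to_folder(label_ids: list[str]) -> str:
--     priority = ["INBOX", "SENT", "DRAFT", "SPAM", "TRASH"]
--     for label in priority:
--         if label in label_ids:
--             return label
--     if label_ids:
--         return label_ids[0]
--     return "UNKNOWN"
-- ===== SOURCE B (Python) =====
-- def _labels_to_folder(label_ids: list[str]) -> str:
--     if not label_ids:
--         return "UNKNOWN"
--     rank = {"INBOX": 0, "SENT": 1, "DRAFT": 2, "SPAM": 3, "TRASH": 4}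
--     return min(label_ids, key=lambda l: rank.get(l, 5))
-- ===== Notes on version B (the rewrite author's own statement) =====
-- stated objective: alternative
-- what changed: Replaces the scan over the priority list with membership tests by a single stable min over label_ids keyed by a precomputed rank dict (non-priority labels share a sentinel rank, so the fallback is label_ids[0]).
import Mathlib
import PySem

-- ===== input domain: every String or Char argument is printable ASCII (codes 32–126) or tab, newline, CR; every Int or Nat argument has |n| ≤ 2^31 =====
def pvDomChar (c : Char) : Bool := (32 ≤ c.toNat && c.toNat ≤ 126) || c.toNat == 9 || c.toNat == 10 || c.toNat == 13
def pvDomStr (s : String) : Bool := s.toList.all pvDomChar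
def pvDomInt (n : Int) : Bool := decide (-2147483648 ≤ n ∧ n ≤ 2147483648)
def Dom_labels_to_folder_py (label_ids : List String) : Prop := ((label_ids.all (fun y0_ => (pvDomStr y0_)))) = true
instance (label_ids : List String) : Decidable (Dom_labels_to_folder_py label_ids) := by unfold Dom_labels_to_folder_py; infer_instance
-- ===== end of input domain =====

-- B replaces A's scan over the priority list by one stable min over label_ids keyed by a rank table (alternative decomposition).


-- ===== PORT A =====
-- for label in priority: if label in label_ids: return label  — the early-return loop is find? over priority
def labels_to_folder_py (label_ids : List String) : String :=
  let priority := ["INBOX", "SENT", "DRAFT", "SPAM", "TRASH"]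
  match priority.find? (fun label => label_ids.contains label) with
  | some label => label
  | none =>
    match label_ids with
    | [] => "UNKNOWN"
    | x :: _ => x

-- ===== PORT B =====
-- rank.get(l, 5): the literal 5-entry dict lookup, ported as a direct key→rank function (exact)
def pvRank (s : String) : Int :=
  if s = "INBOX" then 0 else if s = "SENT" then 1 else if s = "DRAFT" then 2
  else if s = "SPAM" then 3 else if s = "TRASH" then 4 else 5

-- min(label_ids, key=…): stable first-minimum fold (strict '<' keeps the earlier element on ties)
def pvMinBy (r : String → Int) : String → List String → String
  | best, [] => best
  | best, x :: xs => if r x < r best then pvMinBy r x xs else pvMinBy r best xs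

def labels_to_folder_py_alt (label_ids : List String) : String :=
  match label_ids with
  | [] => "UNKNOWN"
  | x :: xs => pvMinBy pvRank x xs

-- ===== PRECONDITION & SPEC =====
def Spec_labels_to_folder_py (label_ids : List String) (out : String) : Prop := out = labels_to_folder_py_alt label_ids
instance (label_ids : List String) (out : String) : Decidable (Spec_labels_to_folder_py label_ids out) := by unfold Spec_labels_to_folder_py; infer_instance

-- ===== CLAIM (what is proved, stated in full; the proofs are below) =====
def Claim_equal_labels_to_folder_py : Prop := ∀ (label_ids : List String), Dom_labels_to_folder_py label_ids → Spec_labels_to_folder_py label_ids (labels_to_folder_py label_ids)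

-- ===== LEMMAS AND PROOFS =====
theorem pvMinBy_mem (r : String → Int) (b : String) (xs : List String) :
    pvMinBy r b xs ∈ b :: xs := by
  induction xs generalizing b with
  | nil => simp [pvMinBy]
  | cons x xs ih =>
    simp only [pvMinBy]
    split
    · have := ih x; simp at this ⊢; tauto
    · have := ih b; simp at this ⊢; tauto

theorem pvMinBy_le (r : String → Int) (b : String) (xs : List String) :
    ∀ y ∈ b :: xs, r (pvMinBy r b xs) ≤ r y := by
  induction xs generalizing b with
  | nil => simp [pvMinBy]
  | cons x xs ih =>
    intro y hy
    simp only [pvMinBy]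
    split
    · rename_i h
      have hle := ih x
      simp only [List.mem_cons] at hy
      rcases hy with rfl | rfl | hy
      · exact le_trans (hle x (by simp)) (le_of_lt h)
      · exact hle y (by simp)
      · exact hle y (by simp [hy])
    · rename_i h
      have hle := ih b
      simp only [List.mem_cons] at hy
      rcases hy with rfl | rfl | hy
      · exact hle y (by simp)
      · exact le_trans (hle b (by simp)) (le_of_not_gt h)
      · exact hle y (by simp [hy])

theorem pvMinBy_stay (r : String → Int) (b : String) (xs : List String)
    (h : ∀ y ∈ xs, r b ≤ r y) : pvMinBy r b xs = b := by
  induction xs with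
  | nil => rfl
  | cons x xs ih =>
    simp only [pvMinBy]
    rw [if_neg (not_lt.mpr (h x (by simp)))]
    exact ih (fun y hy => h y (by simp [hy]))

theorem pvRank_eq_zero {s : String} (h : pvRank s ≤ 0) : s = "INBOX" := by
  unfold pvRank at h; split_ifs at h <;> first | assumption | omega

theorem pvRank_eq_one {s : String} (h : pvRank s ≤ 1) (h0 : s ≠ "INBOX") : s = "SENT" := by
  unfold pvRank at h; split_ifs at h <;> first | assumption | omega | exact absurd ‹_› h0

theorem pvRank_eq_two {s : String} (h : pvRank s ≤ 2) (h0 : s ≠ "INBOX") (h1 : s ≠ "SENT") :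
    s = "DRAFT" := by
  unfold pvRank at h
  split_ifs at h <;> first | assumption | omega | exact absurd ‹_› h0 | exact absurd ‹_› h1

theorem pvRank_eq_three {s : String} (h : pvRank s ≤ 3) (h0 : s ≠ "INBOX") (h1 : s ≠ "SENT")
    (h2 : s ≠ "DRAFT") : s = "SPAM" := by
  unfold pvRank at h
  split_ifs at h <;>
    first | assumption | omega | exact absurd ‹_› h0 | exact absurd ‹_› h1 | exact absurd ‹_› h2

theorem pvRank_eq_four {s : String} (h : pvRank s ≤ 4) (h0 : s ≠ "INBOX") (h1 : s ≠ "SENT")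
    (h2 : s ≠ "DRAFT") (h3 : s ≠ "SPAM") : s = "TRASH" := by
  unfold pvRank at h
  split_ifs at h <;>
    first | assumption | omega | exact absurd ‹_› h0 | exact absurd ‹_› h1
          | exact absurd ‹_› h2 | exact absurd ‹_› h3

-- ===== VERDICT (by name: the statement is the Claim_ definition above) =====
theorem labels_to_folder_py_spec : Claim_equal_labels_to_folder_py := by
  intro label_ids _
  unfold Spec_labels_to_folder_py labels_to_folder_py labels_to_folder_py_alt
  cases label_ids with
  | nil => simp
  | cons x xs =>
    simp only
    set l := x :: xs with hl
    set m := pvMinBy pvRank x xs with hm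
    have hmem : m ∈ l := pvMinBy_mem pvRank x xs
    have hle : ∀ y ∈ l, pvRank m ≤ pvRank y := pvMinBy_le pvRank x xs
    by_cases h0 : "INBOX" ∈ l
    · 
      have : m = "INBOX" := pvRank_eq_zero (hle _ h0)
      simp [List.find?, h0, this]
    · 
      by_cases h1 : "SENT" ∈ l
      · 
        have : m = "SENT" := pvRank_eq_one (hle _ h1) (fun h => h0 (h ▸ hmem))
        simp [List.find?, h0, h1, this]
      · 
        by_cases h2 : "DRAFT" ∈ l
        · 
          have : m = "DRAFT" :=
            pvRank_eq_two (hle _ h2) (fun h => h0 (h ▸ hmem)) (fun h => h1 (h ▸ hmem))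
          simp [List.find?, h0, h1, h2, this]
        · 
          by_cases h3 : "SPAM" ∈ l
          · 
            have : m = "SPAM" :=
              pvRank_eq_three (hle _ h3) (fun h => h0 (h ▸ hmem)) (fun h => h1 (h ▸ hmem))
                (fun h => h2 (h ▸ hmem))
            simp [List.find?, h0, h1, h2, h3, this]
          · 
            by_cases h4 : "TRASH" ∈ l
            · 
              have : m = "TRASH" :=
                pvRank_eq_four (hle _ h4) (fun h => h0 (h ▸ hmem)) (fun h => h1 (h ▸ hmem))
                  (fun h => h2 (h ▸ hmem)) (fun h => h3 (h ▸ hmem))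
              simp [List.find?, h0, h1, h2, h3, h4, this]
            · 
              -- no priority label present: every element has rank 5, min is the head x
              have hr : ∀ y ∈ l, pvRank y = 5 := by
                intro y hy
                have a : y ≠ "INBOX" := fun h => h0 (h ▸ hy)
                have b : y ≠ "SENT" := fun h => h1 (h ▸ hy)
                have c : y ≠ "DRAFT" := fun h => h2 (h ▸ hy)
                have d : y ≠ "SPAM" := fun h => h3 (h ▸ hy)
                have e : y ≠ "TRASH" := fun h => h4 (h ▸ hy)
                simp [pvRank, a, b, c, d, e]
              have hx : m = x := pvMinBy_stay pvRank x xs (fun y hy => by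
                rw [hr x (by simp [hl]), hr y (by simp [hl, hy])])
              simp [List.find?, h0, h1, h2, h3, h4, hx]
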